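-- pv_equiv track=rewrite | github.com/KrozFu/project-algorithms | tests/p-testing/Final.py | convertir_letras_a_valores_entrega4
-- ===== SOURCE A (Python) =====
-- valores_letras = {
--     'A': 0,
--     'B': 1,
--     'C': 2,
--     'D': 3,
--     'E': 4,
--     'F': 5,
--     'G': 6,
--     'H': 7,
--     'I': 8,
--     'J': 9,
--     'K': 10,
--     'L': 11,
--     'M': 12,
--     'N': 13,
--     'O': 14,
--     'P': 15,
--     'Q': 16,
--     'R': 17,
--     'S': 18,
--     'T': 19,
--     'U': 20,
--     'V': 21,
--     'W': 22,
--     'X': 23,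
--     'Y': 24,
--     'Z': 25
-- }
--
-- def convertir_letras_a_valores_entrega4(letras):
--     valores = []
--     letras = letras.upper().split()  # Convertir todo a mayúsculas y dividir por espacios
--     for letra in letras:
--         if letra in valores_letras:
--             valores.append(valores_letras[letra]+1)  # Convertir el valor a cadena antes de agregarlo
--         else:
--             valores.append(None)  # o manejar valores no válidos según sea necesario
--     return valores  # Unir los valores en una cadena separados por espacio
-- ===== SOURCE B (Python) =====
-- def convertir_letras_a_valores_entrega4(letras):
--     # Character-level state machine: one scan over the raw string, no .upper()
--     # pre-pass, no .split() and no letter-value table.  A token's value is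
--     # fixed at its first character (uppercased arithmetically) and demoted to
--     # None as soon as the token grows past one character.
--     out = []
--     in_tok = False
--     val = None
--     for ch in letras:
--         if ch.isspace():
--             if in_tok:
--                 out.append(val)
--                 in_tok = False
--         elif in_tok:
--             val = None
--         else:
--             in_tok = True
--             u = ch.upper()
--             val = ord(u) - 64 if 'A' <= u <= 'Z' else None
--     if in_tok:
--         out.append(val)
--     return out
-- ===== Notes on version B (the rewrite author's own statement) =====
-- stated objective: alternative
-- what changed: B replaces A's upper-then-split-then-dict-lookup pipeline by a single character-level state machine over the raw string: token boundaries are detected per character, the value is computed arithmetically from the token's first character and demoted to None when the token exceeds one character, so no letter-value table and no intermediate token list exist.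
import Mathlib
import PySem

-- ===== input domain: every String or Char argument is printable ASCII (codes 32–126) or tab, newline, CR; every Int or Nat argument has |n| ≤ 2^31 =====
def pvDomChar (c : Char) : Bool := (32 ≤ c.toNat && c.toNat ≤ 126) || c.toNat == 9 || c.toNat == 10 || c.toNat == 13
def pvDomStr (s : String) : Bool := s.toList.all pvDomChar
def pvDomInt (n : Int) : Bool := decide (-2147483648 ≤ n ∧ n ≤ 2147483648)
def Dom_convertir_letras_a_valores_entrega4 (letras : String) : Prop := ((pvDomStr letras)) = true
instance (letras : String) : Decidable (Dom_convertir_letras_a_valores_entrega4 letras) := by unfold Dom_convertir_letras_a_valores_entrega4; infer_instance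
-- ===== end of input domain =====

-- B replaces A's upper-then-split-then-dict-lookup pipeline by a single character-level
-- state machine over the raw string (no letter table, no intermediate token list); objective: alternative.

-- ===== PORT A =====
-- the module-level dict valores_letras (distinct keys, insertion order)
def valores_letras : PySem.Dict String Int :=
  ⟨[("A", 0), ("B", 1), ("C", 2), ("D", 3), ("E", 4), ("F", 5), ("G", 6), ("H", 7),
    ("I", 8), ("J", 9), ("K", 10), ("L", 11), ("M", 12), ("N", 13), ("O", 14), ("P", 15),
    ("Q", 16), ("R", 17), ("S", 18), ("T", 19), ("U", 20), ("V", 21), ("W", 22), ("X", 23),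
    ("Y", 24), ("Z", 25)]⟩

def convertir_letras_a_valores_entrega4 (letras : String) : List (Option Int) :=
  -- valores = []; letras = letras.upper().split(); for letra in letras: …
  let letras' := PySem.Str.split₀ (PySem.Str.upper letras)
  letras'.foldl (fun valores letra =>
    match valores_letras.get? letra with          -- 'letra in valores_letras' + lookup
    | some v => valores ++ [some (v + 1)]
    | none   => valores ++ [none]) []

-- ===== PORT B =====
-- loop body of B: state (out, in_tok, val); per-character branches in B's order
def pvBStep (st : List (Option Int) × Bool × Option Int) (ch : Char) :
    List (Option Int) × Bool × Option Int :=
  if PySem.Chars.isspace ch then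
    if st.2.1 then (st.1 ++ [st.2.2], false, st.2.2) else st
  else if st.2.1 then (st.1, true, none)
  else
    let u := PySem.Chars.upperChar ch                  -- u = ch.upper()
    (st.1, true, if 'A' ≤ u ∧ u ≤ 'Z' then some ((u.toNat : Int) - 64) else none)

-- the post-loop flush: if in_tok: out.append(val)
def pvBFinal (st : List (Option Int) × Bool × Option Int) : List (Option Int) :=
  if st.2.1 then st.1 ++ [st.2.2] else st.1

def convertir_letras_a_valores_entrega4_alt (letras : String) : List (Option Int) :=
  pvBFinal (letras.toList.foldl pvBStep ([], false, none))

-- ===== PRECONDITION & SPEC =====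
def Spec_convertir_letras_a_valores_entrega4 (letras : String) (out : List (Option Int)) : Prop := out = convertir_letras_a_valores_entrega4_alt letras
instance (letras : String) (out : List (Option Int)) : Decidable (Spec_convertir_letras_a_valores_entrega4 letras out) := by unfold Spec_convertir_letras_a_valores_entrega4; infer_instance

-- ===== CLAIM (what is proved, stated in full; the proofs are below) =====
def Claim_equal_convertir_letras_a_valores_entrega4 : Prop := ∀ (letras : String), Dom_convertir_letras_a_valores_entrega4 letras → Spec_convertir_letras_a_valores_entrega4 letras (convertir_letras_a_valores_entrega4 letras)

-- ===== LEMMAS AND PROOFS =====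

-- the value both programs attach to one (already uppercased) token, as a List Char function
def pvCharTokVal (w : List Char) : Option Int :=
  match w with
  | [c] => if 'A' ≤ c ∧ c ≤ 'Z' then some ((c.toNat : Int) - 64) else none
  | _   => none

-- A's per-token result, factored out of the fold body
def pvTokA (t : String) : Option Int :=
  (valores_letras.get? t).map (· + 1)

theorem pv_beq_toNat (k c : Char) : (k == c) = decide (k.toNat = c.toNat) := by
  rw [Bool.eq_iff_iff]
  simp only [beq_iff_eq, decide_eq_true_eq]
  exact ⟨fun h => by rw [h], fun h => Char.ext (UInt32.toNat_inj.mp h)⟩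

theorem pv_beq_string (s t : String) : (s == t) = (s.toList == t.toList) := by
  rw [Bool.eq_iff_iff]
  simp [← String.toList_inj]

theorem pv_one (s : String) (k : Char) (m : Nat) (hs : s.toList = [k]) (hm : k.toNat = m)
    (t : String) (c : Char) (ht : t.toList = [c]) : (s == t) = decide (m = c.toNat) := by
  rw [pv_beq_string, hs, ht]
  simp [pv_beq_toNat, hm]

set_option maxHeartbeats 1000000 in
theorem pv_tok_eq (t : String) : pvTokA t = pvCharTokVal t.toList := by
  unfold pvTokA pvCharTokVal valores_letras
  rcases ht : t.toList with _ | ⟨c, _ | ⟨d, r⟩⟩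
  · simp [PySem.Dict.get?_mk_cons, pv_beq_string, ht, PySem.Dict.get?]
  · have hle1 : ('A' ≤ c ∧ c ≤ 'Z') ↔ (65 ≤ c.toNat ∧ c.toNat ≤ 90) := Iff.rfl
    simp only [PySem.Dict.get?_mk_cons, ht,
      pv_one "A" 'A' 65 (by decide) (by decide) t c ht,
      pv_one "B" 'B' 66 (by decide) (by decide) t c ht,
      pv_one "C" 'C' 67 (by decide) (by decide) t c ht,
      pv_one "D" 'D' 68 (by decide) (by decide) t c ht,
      pv_one "E" 'E' 69 (by decide) (by decide) t c ht,
      pv_one "F" 'F' 70 (by decide) (by decide) t c ht,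
      pv_one "G" 'G' 71 (by decide) (by decide) t c ht,
      pv_one "H" 'H' 72 (by decide) (by decide) t c ht,
      pv_one "I" 'I' 73 (by decide) (by decide) t c ht,
      pv_one "J" 'J' 74 (by decide) (by decide) t c ht,
      pv_one "K" 'K' 75 (by decide) (by decide) t c ht,
      pv_one "L" 'L' 76 (by decide) (by decide) t c ht,
      pv_one "M" 'M' 77 (by decide) (by decide) t c ht,
      pv_one "N" 'N' 78 (by decide) (by decide) t c ht,
      pv_one "O" 'O' 79 (by decide) (by decide) t c ht,
      pv_one "P" 'P' 80 (by decide) (by decide) t c ht,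
      pv_one "Q" 'Q' 81 (by decide) (by decide) t c ht,
      pv_one "R" 'R' 82 (by decide) (by decide) t c ht,
      pv_one "S" 'S' 83 (by decide) (by decide) t c ht,
      pv_one "T" 'T' 84 (by decide) (by decide) t c ht,
      pv_one "U" 'U' 85 (by decide) (by decide) t c ht,
      pv_one "V" 'V' 86 (by decide) (by decide) t c ht,
      pv_one "W" 'W' 87 (by decide) (by decide) t c ht,
      pv_one "X" 'X' 88 (by decide) (by decide) t c ht,
      pv_one "Y" 'Y' 89 (by decide) (by decide) t c ht,
      pv_one "Z" 'Z' 90 (by decide) (by decide) t c ht]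
    simp only [hle1]
    clear hle1 ht
    generalize c.toNat = n
    clear c
    by_cases hr : 65 ≤ n ∧ n ≤ 90
    · rw [if_pos hr]
      obtain ⟨h1, h2⟩ := hr
      interval_cases n <;> norm_num
    · rw [if_neg hr]
      have hfalse : ∀ k : Nat, 65 ≤ k → k ≤ 90 → ¬ (decide (k = n) = true) := by
        intro k hk1 hk2 hk
        rw [decide_eq_true_eq] at hk
        omega
      rw [if_neg (hfalse 65 (by norm_num) (by norm_num)), if_neg (hfalse 66 (by norm_num) (by norm_num)), if_neg (hfalse 67 (by norm_num) (by norm_num)), if_neg (hfalse 68 (by norm_num) (by norm_num)), if_neg (hfalse 69 (by norm_num) (by norm_num)), if_neg (hfalse 70 (by norm_num) (by norm_num)), if_neg (hfalse 71 (by norm_num) (by norm_num)), if_neg (hfalse 72 (by norm_num) (by norm_num)), if_neg (hfalse 73 (by norm_num) (by norm_num)), if_neg (hfalse 74 (by norm_num) (by norm_num)), if_neg (hfalse 75 (by norm_num) (by norm_num)), if_neg (hfalse 76 (by norm_num) (by norm_num)), if_neg (hfalse 77 (by norm_num) (by norm_num)), if_neg (hfalse 78 (by norm_num) (by norm_num)),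 if_neg (hfalse 79 (by norm_num) (by norm_num)), if_neg (hfalse 80 (by norm_num) (by norm_num)), if_neg (hfalse 81 (by norm_num) (by norm_num)), if_neg (hfalse 82 (by norm_num) (by norm_num)), if_neg (hfalse 83 (by norm_num) (by norm_num)), if_neg (hfalse 84 (by norm_num) (by norm_num)), if_neg (hfalse 85 (by norm_num) (by norm_num)), if_neg (hfalse 86 (by norm_num) (by norm_num)), if_neg (hfalse 87 (by norm_num) (by norm_num)), if_neg (hfalse 88 (by norm_num) (by norm_num)), if_neg (hfalse 89 (by norm_num) (by norm_num)), if_neg (hfalse 90 (by norm_num) (by norm_num))]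
      rfl
  · simp [PySem.Dict.get?_mk_cons, pv_beq_string, ht, PySem.Dict.get?]

theorem pv_foldl_append (f : String → Option Int) :
    ∀ (l : List String) (acc : List (Option Int)),
      l.foldl (fun v t => v ++ [f t]) acc = acc ++ l.map f := by
  intro l
  induction l with
  | nil => simp
  | cons x xs ih => intro acc; simp [List.foldl_cons, ih]

theorem pv_charTokVal_long (w : List Char) (h : w.length ≠ 1) : pvCharTokVal w = none := by
  unfold pvCharTokVal
  match w, h with
  | [], _ => rfl
  | [c], h => exact absurd rfl h
  | a :: b :: r, _ => rfl

theorem pv_isspace_false_of (c : Char) (h1 : 65 ≤ c.toNat) (h2 : c.toNat ≤ 90) :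
    PySem.Chars.isspace c = false := by
  unfold PySem.Chars.isspace
  simp only [Bool.or_eq_false_iff, Bool.and_eq_false_iff, decide_eq_false_iff_not]
  omega

theorem pv_isspace_upperChar (c : Char) :
    PySem.Chars.isspace (PySem.Chars.upperChar c) = PySem.Chars.isspace c := by
  unfold PySem.Chars.upperChar
  by_cases h : PySem.Chars.islower c = true
  · rw [if_pos h]
    have hc : 97 ≤ c.toNat ∧ c.toNat ≤ 122 := by
      unfold PySem.Chars.islower at h
      simp only [Bool.and_eq_true, decide_eq_true_eq] at h
      exact ⟨h.1, h.2⟩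
    have hval : Nat.isValidChar (c.toNat - 32) := Or.inl (by omega)
    have hv : (Char.ofNat (c.toNat - 32)).toNat = c.toNat - 32 := by
      rw [Char.toNat_ofNat, if_pos hval]
    have h2 : PySem.Chars.isspace c = false := by
      unfold PySem.Chars.isspace
      simp only [Bool.or_eq_false_iff, Bool.and_eq_false_iff, decide_eq_false_iff_not]
      omega
    rw [pv_isspace_false_of _ (by rw [hv]; omega) (by rw [hv]; omega), h2]
  · rw [if_neg h]

-- the core simulation: B's character fold computes exactly the mapped split of the uppercased string
theorem pv_key : ∀ (cs cur : List Char) (acc : List (List Char))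
    (out : List (Option Int)) (inTok : Bool) (val : Option Int),
    inTok = !cur.isEmpty →
    (cur ≠ [] → val = pvCharTokVal cur.reverse) →
    out = acc.reverse.map pvCharTokVal →
    pvBFinal (cs.foldl pvBStep (out, inTok, val)) =
      (PySem.Chars.split₀.go (PySem.Chars.upper cs) cur acc).map pvCharTokVal := by
  intro cs
  induction cs with
  | nil =>
    intro cur acc out inTok val hTok hVal hOut
    cases cur with
    | nil =>
      simp only [List.isEmpty_nil, Bool.not_true] at hTok
      subst hTok hOut
      simp [pvBFinal, PySem.Chars.upper, PySem.Chars.split₀.go]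
    | cons d ds =>
      simp only [List.isEmpty_cons, Bool.not_false] at hTok
      subst hTok hOut
      have hv := hVal (by simp)
      simp [pvBFinal, PySem.Chars.upper, PySem.Chars.split₀.go, hv]
  | cons c rest ih =>
    intro cur acc out inTok val hTok hVal hOut
    have hupper : PySem.Chars.upper (c :: rest) =
        PySem.Chars.upperChar c :: PySem.Chars.upper rest := by
      simp [PySem.Chars.upper]
    rw [List.foldl_cons, hupper]
    by_cases hsp : PySem.Chars.isspace c = true
    · cases cur with
      | nil =>
        simp only [List.isEmpty_nil, Bool.not_true] at hTok; subst hTok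
        have hstep : pvBStep (out, false, val) c = (out, false, val) := by
          simp [pvBStep, hsp]
        rw [hstep]
        unfold PySem.Chars.split₀.go
        rw [pv_isspace_upperChar, hsp]
        simp only [List.isEmpty_nil, if_true]
        exact ih [] acc out false val rfl (by simp) hOut
      | cons d ds =>
        simp only [List.isEmpty_cons, Bool.not_false] at hTok; subst hTok
        have hstep : pvBStep (out, true, val) c = (out ++ [val], false, val) := by
          simp [pvBStep, hsp]
        rw [hstep]
        unfold PySem.Chars.split₀.go
        rw [pv_isspace_upperChar, hsp]
        simp only [List.isEmpty_cons, if_true, Bool.false_eq_true, if_false]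
        refine ih [] ((d :: ds).reverse :: acc) (out ++ [val]) false val rfl (by simp) ?_
        rw [hOut, hVal (by simp)]
        simp
    · have hsp' : PySem.Chars.isspace c = false := by
        cases h : PySem.Chars.isspace c
        · rfl
        · exact absurd h hsp
      cases cur with
      | nil =>
        simp only [List.isEmpty_nil, Bool.not_true] at hTok; subst hTok
        have hstep : pvBStep (out, false, val) c =
            (out, true,
              if 'A' ≤ PySem.Chars.upperChar c ∧ PySem.Chars.upperChar c ≤ 'Z' then
                some (((PySem.Chars.upperChar c).toNat : Int) - 64) else none) := by
          simp [pvBStep, hsp']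
        rw [hstep]
        unfold PySem.Chars.split₀.go
        rw [pv_isspace_upperChar, hsp']
        simp only [Bool.false_eq_true, if_false]
        refine ih [PySem.Chars.upperChar c] acc out true _ rfl (fun _ => ?_) hOut
        simp [pvCharTokVal]
      | cons d ds =>
        simp only [List.isEmpty_cons, Bool.not_false] at hTok; subst hTok
        have hstep : pvBStep (out, true, val) c = (out, true, none) := by
          simp [pvBStep, hsp']
        rw [hstep]
        unfold PySem.Chars.split₀.go
        rw [pv_isspace_upperChar, hsp']
        simp only [Bool.false_eq_true, if_false]
        refine ih (PySem.Chars.upperChar c :: d :: ds) acc out true none rfl (fun _ => ?_) hOut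
        rw [pv_charTokVal_long]
        simp

-- ===== VERDICT (by name: the statement is the Claim_ definition above) =====
theorem convertir_letras_a_valores_entrega4_spec : Claim_equal_convertir_letras_a_valores_entrega4 := by
  intro letras _
  show convertir_letras_a_valores_entrega4 letras = convertir_letras_a_valores_entrega4_alt letras
  unfold convertir_letras_a_valores_entrega4 convertir_letras_a_valores_entrega4_alt
  have hbody : (fun (valores : List (Option Int)) (letra : String) =>
      match valores_letras.get? letra with
      | some v => valores ++ [some (v + 1)]
      | none   => valores ++ [none]) = fun v t => v ++ [pvTokA t] := by
    funext v t
    unfold pvTokA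
    cases valores_letras.get? t <;> rfl
  simp only [hbody, pv_foldl_append, List.nil_append]
  have hA : (PySem.Str.split₀ (PySem.Str.upper letras)).map pvTokA =
      (PySem.Chars.split₀ (PySem.Chars.upper letras.toList)).map pvCharTokVal := by
    rw [PySem.Str.split₀, PySem.Str.toList_upper, List.map_map]
    apply List.map_congr_left
    intro w _
    show pvTokA (String.ofList w) = pvCharTokVal w
    rw [pv_tok_eq, String.toList_ofList]
  rw [hA, PySem.Chars.split₀]
  exact (pv_key letras.toList [] [] [] false none rfl (by simp) rfl).symm
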